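-- pv_equiv track=rewrite | github.com/jordlee/camera-rag-agent | src/parsing/csharp_parser.py | extract_method_body
-- ===== SOURCE A (Python) =====
-- from typing import List, Dict, Any, Optional
--
-- def extract_method_body(lines: List[str], start_index: int) -> tuple[str, int]:
--     """Extract method body using brace matching."""
--     # Find opening brace
--     open_brace_index = start_index
--     for i in range(start_index, len(lines)):
--         if '{' in lines[i]:
--             open_brace_index = i
--             break
--
--     # Match braces
--     brace_count = 0
--     body_lines = []
--     end_index = open_brace_index
--
--     for i in range(open_brace_index, len(lines)):
--         line = lines[i]
--         brace_count += line.count('{') - line.count('}')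
--         body_lines.append(line)
--
--         if brace_count == 0:
--             end_index = i
--             break
--
--     return '\n'.join(body_lines), end_index
-- ===== SOURCE B (Python) =====
-- def extract_method_body(lines, start_index):
--     """Extract method body using brace matching."""
--     # first line at or after start_index that contains '{' (default: start_index)
--     open_brace_index = next(
--         (i for i, line in enumerate(lines[start_index:], start_index) if '{' in line),
--         start_index)
--     tail = lines[open_brace_index:]
--     # running brace balance per line of the tail
--     deltas = [line.count('{') - line.count('}') for line in tail]
--     balances = []
--     total = 0
--     for d in deltas:
--         total += d
--         balances.append(total)
--     try:
--         offset = balances.index(0)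
--     except ValueError:
--         return '\n'.join(tail), open_brace_index
--     return '\n'.join(tail[:offset + 1]), open_brace_index + offset
-- ===== Notes on version B (the rewrite author's own statement) =====
-- stated objective: alternative
-- what changed: Replaces A's two index-driven loops with break/accumulator by a slice-based pipeline: find the opening line with next() over enumerate, materialise the per-line brace deltas and their running balances, then locate the matching line with balances.index(0) and trim with a slice. Pre_ excludes negative start_index, where A either raises IndexError (start_index < -len(lines)) or returns a value produced by Python's negative-index wraparound, which can visit the same lines twice.
-- outside the precondition, e.g. on extract_method_body(['{'], -1): A returns ('{\n{', -1), B returns ('{', -1); on extract_method_body([], -1): A raises IndexError, B returns ('', -1)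
import Mathlib
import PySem

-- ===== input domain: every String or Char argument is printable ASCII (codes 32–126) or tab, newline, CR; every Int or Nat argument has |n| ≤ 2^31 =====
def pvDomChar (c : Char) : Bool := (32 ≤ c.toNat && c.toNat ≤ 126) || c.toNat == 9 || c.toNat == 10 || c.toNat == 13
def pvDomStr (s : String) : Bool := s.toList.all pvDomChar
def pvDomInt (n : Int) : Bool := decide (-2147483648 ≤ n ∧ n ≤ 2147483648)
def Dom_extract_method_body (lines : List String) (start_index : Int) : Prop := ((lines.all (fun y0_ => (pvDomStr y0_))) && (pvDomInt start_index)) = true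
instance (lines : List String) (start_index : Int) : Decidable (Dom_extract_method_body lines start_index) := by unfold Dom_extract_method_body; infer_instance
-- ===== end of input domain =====

-- B replaces A's two index-driven loops-with-break by a slice/enumerate/prefix-balance/index pipeline (alternative decomposition, same cost); equivalence proved for 0 ≤ start_index.


-- ===== PORT A =====
-- first for-loop of A: scan indices, break at the first line containing '{' (acc = initial open_brace_index)
def pvAFindOpen (lines : List String) : List Int → Int → Int
  | [], acc => acc
  | i :: rest, acc =>
    match PySem.List.pyGet? lines i with
    | none => acc   -- Python IndexError here; excluded by Pre_
    | some l => if PySem.Str.isIn "{" l then i else pvAFindOpen lines rest acc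

-- second for-loop of A: accumulate brace_count and body_lines, break when brace_count = 0
def pvALoop (lines : List String) : List Int → Int → List String → Int → List String × Int
  | [], _, body, e => (body, e)
  | i :: rest, bc, body, e =>
    match PySem.List.pyGet? lines i with
    | none => (body, e)   -- Python IndexError here; excluded by Pre_
    | some line =>
      let bc' := bc + ((PySem.Str.count line "{" : Int) - (PySem.Str.count line "}" : Int))
      let body' := body ++ [line]
      if bc' = 0 then (body', i) else pvALoop lines rest bc' body' e

def extract_method_body (lines : List String) (start_index : Int) : String × Int :=
  let openIdx := pvAFindOpen lines (PySem.List.pyRange start_index (lines.length : Int) 1) start_index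
  let r := pvALoop lines (PySem.List.pyRange openIdx (lines.length : Int) 1) 0 [] openIdx
  (PySem.Str.join "\n" r.1, r.2)

-- ===== PORT B =====
-- running balances of Source B's for-d-in-deltas loop (state = (balances, total))
def pvBBalances (deltas : List Int) : List Int :=
  (deltas.foldl (fun (st : List Int × Int) d =>
    let t := st.2 + d
    (st.1 ++ [t], t)) ([], 0)).1

def extract_method_body_alt (lines : List String) (start_index : Int) : String × Int :=
  let openIdx :=
    match (PySem.List.enumerate (PySem.List.slice lines (some start_index) none) start_index).find?
        (fun p => PySem.Str.isIn "{" p.2) with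
    | some p => p.1
    | none => start_index
  let tail := PySem.List.slice lines (some openIdx) none
  let deltas := tail.map (fun line => (PySem.Str.count line "{" : Int) - (PySem.Str.count line "}" : Int))
  match PySem.List.index? (pvBBalances deltas) 0 with
  | none => (PySem.Str.join "\n" tail, openIdx)
  | some j => (PySem.Str.join "\n" (PySem.List.slice tail none (some ((j : Int) + 1))), openIdx + (j : Int))

-- ===== PRECONDITION & SPEC =====
-- Pre_ excludes negative start_index, where A either raises IndexError (start_index < -len(lines)) or
-- returns a value produced by Python's negative-index wraparound, which can visit the same lines twice.
def Pre_extract_method_body (lines : List String) (start_index : Int) : Prop := 0 ≤ start_index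
instance (lines : List String) (start_index : Int) : Decidable (Pre_extract_method_body lines start_index) := by unfold Pre_extract_method_body; infer_instance
def pvWitness_extract_method_body : List String × Int := (["void f()", "{", "  x;", "}"], 0)

def Spec_extract_method_body (lines : List String) (start_index : Int) (out : String × Int) : Prop := out = extract_method_body_alt lines start_index
instance (lines : List String) (start_index : Int) (out : String × Int) : Decidable (Spec_extract_method_body lines start_index out) := by unfold Spec_extract_method_body; infer_instance

-- ===== CLAIM (what is proved, stated in full; the proofs are below) =====
def Claim_equal_extract_method_body : Prop := ∀ (lines : List String) (start_index : Int), Dom_extract_method_body lines start_index → Pre_extract_method_body lines start_index → Spec_extract_method_body lines start_index (extract_method_body lines start_index)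
-- ===== LEMMAS AND PROOFS =====

-- per-line brace delta (abbreviation for statements)
def pvDelta (line : String) : Int := (PySem.Str.count line "{" : Int) - (PySem.Str.count line "}" : Int)

-- running balances, structurally
def pvBal (bc : Int) : List Int → List Int
  | [] => []
  | d :: ds => (bc + d) :: pvBal (bc + d) ds

theorem pvBBalances_foldl (ds : List Int) : ∀ (acc : List Int) (t : Int),
    (ds.foldl (fun (st : List Int × Int) d => let t := st.2 + d; (st.1 ++ [t], t)) (acc, t)).1
      = acc ++ pvBal t ds := by
  induction ds with
  | nil => intro acc t; simp [pvBal]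
  | cons d ds ih => intro acc t; simp [List.foldl_cons, pvBal, ih]

theorem pvBBalances_eq (ds : List Int) : pvBBalances ds = pvBal 0 ds := by
  simpa using pvBBalances_foldl ds [] 0

theorem pvFindOpen_eq (lines : List String) : ∀ (k : Nat) (s : Nat) (acc : Int),
    lines.length - s ≤ k →
    pvAFindOpen lines (PySem.List.pyRange (s : Int) (lines.length : Int) 1) acc =
      (match (PySem.List.enumerate (lines.drop s) (s : Int)).find?
          (fun p => PySem.Str.isIn "{" p.2) with
       | some p => p.1
       | none => acc) := by
  intro k
  induction k with
  | zero =>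
    intro s acc hk
    have hs : lines.length ≤ s := by omega
    rw [PySem.List.pyRange_one_eq_nil (by exact_mod_cast hs)]
    rw [List.drop_eq_nil_of_le hs]
    simp [pvAFindOpen, PySem.List.enumerate_nil]
  | succ k ih =>
    intro s acc hk
    by_cases hs : s < lines.length
    · rw [PySem.List.pyRange_one_cons (a := (s : Int)) (b := (lines.length : Int))
        (by exact_mod_cast hs)]
      rw [List.drop_eq_getElem_cons hs]
      rw [PySem.List.enumerate_cons]
      simp only [pvAFindOpen, PySem.List.pyGet?_natCast, List.getElem?_eq_getElem hs]
      rw [List.find?_cons]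
      have hcast : ((s : Int) + 1) = ((s + 1 : Nat) : Int) := by push_cast; ring
      by_cases hb : PySem.Chars.isIn ['{'] lines[s].toList = true
      · simp [hb]
      · rw [hcast, ih (s + 1) acc (by omega)]
        simp [hb]
    · have hs' : lines.length ≤ s := by omega
      rw [PySem.List.pyRange_one_eq_nil (by exact_mod_cast hs')]
      rw [List.drop_eq_nil_of_le hs']
      simp [pvAFindOpen, PySem.List.enumerate_nil]

theorem pvLoop_eq (lines : List String) : ∀ (tail : List String) (o : Nat)
    (h : lines.drop o = tail) (bc : Int) (body : List String) (e : Int),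
    pvALoop lines (PySem.List.pyRange (o : Int) (lines.length : Int) 1) bc body e =
      (match PySem.List.index? (pvBal bc (tail.map pvDelta)) 0 with
       | none => (body ++ tail, e)
       | some j => (body ++ tail.take (j + 1), (o : Int) + (j : Int))) := by
  intro tail
  induction tail generalizing lines with
  | nil =>
    intro o h bc body e
    have hs : lines.length ≤ o := List.drop_eq_nil_iff.mp h
    rw [PySem.List.pyRange_one_eq_nil (by exact_mod_cast hs)]
    simp [pvALoop, pvBal, PySem.List.index?_eq_idxOf?]
  | cons l rest ih =>
    intro o h bc body e
    have hlt : o < lines.length := by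
      by_contra hge
      rw [List.drop_eq_nil_of_le (by omega)] at h
      simp at h
    have hget := List.drop_eq_getElem_cons (l := lines) hlt
    rw [h] at hget
    have hl : lines[o] = l := by
      have := hget.symm
      exact (List.cons.injEq _ _ _ _ ▸ this).1
    have hrest : lines.drop (o + 1) = rest := by
      have := hget.symm
      exact (List.cons.injEq _ _ _ _ ▸ this).2.symm ▸ rfl
    rw [PySem.List.pyRange_one_cons (by exact_mod_cast hlt)]
    simp only [pvALoop, PySem.List.pyGet?_natCast, List.getElem?_eq_getElem hlt, hl]
    simp only [List.map_cons, pvBal, pvDelta]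
    by_cases hz : bc + ((PySem.Str.count l "{" : Int) - (PySem.Str.count l "}" : Int)) = 0
    · rw [hz, PySem.List.index?_cons_self]
      simp
    · rw [if_neg hz]
      have hcast : ((o : Int) + 1) = ((o + 1 : Nat) : Int) := by push_cast; ring
      rw [hcast, ih lines (o + 1) hrest _ (body ++ [l]) e]
      rw [PySem.List.index?_cons_of_ne _ hz]
      cases hO : PySem.List.index?
          (pvBal (bc + ((PySem.Str.count l "{" : Int) - (PySem.Str.count l "}" : Int)))
            (List.map pvDelta rest)) 0 with
      | none => simp
      | some j =>
        simp only [Option.map_some, List.take_succ_cons]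
        rw [Prod.mk.injEq]
        exact ⟨by simp, by push_cast; ring⟩

theorem pvTail_part (lines : List String) (o : Nat) :
    (PySem.Str.join "\n" (pvALoop lines (PySem.List.pyRange (o : Int) (lines.length : Int) 1) 0 [] (o : Int)).1,
     (pvALoop lines (PySem.List.pyRange (o : Int) (lines.length : Int) 1) 0 [] (o : Int)).2) =
    (let tail := PySem.List.slice lines (some (o : Int)) none
     let deltas := tail.map (fun line => (PySem.Str.count line "{" : Int) - (PySem.Str.count line "}" : Int))
     match PySem.List.index? (pvBBalances deltas) 0 with
     | none => (PySem.Str.join "\n" tail, (o : Int))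
     | some j => (PySem.Str.join "\n" (PySem.List.slice tail none (some ((j : Int) + 1))), (o : Int) + (j : Int))) := by
  rw [pvLoop_eq lines (lines.drop o) o rfl 0 [] (o : Int)]
  have hfun : (fun line => (PySem.Str.count line "{" : Int) - (PySem.Str.count line "}" : Int)) = pvDelta := rfl
  simp only [PySem.List.slice_from_natCast, pvBBalances_eq, hfun]
  cases hI : PySem.List.index? (pvBal 0 ((lines.drop o).map pvDelta)) 0 with
  | none => simp
  | some j =>
    have hc : ((j : Int) + 1) = ((j + 1 : Nat) : Int) := by push_cast; ring
    dsimp only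
    rw [hc, PySem.List.slice_to_natCast]
    simp

theorem pvMain_nat (lines : List String) (sN : Nat) :
    extract_method_body lines (sN : Int) = extract_method_body_alt lines (sN : Int) := by
  unfold extract_method_body extract_method_body_alt
  rw [pvFindOpen_eq lines (lines.length - sN) sN (sN : Int) (le_refl _)]
  rw [PySem.List.slice_from_natCast]
  cases hF : (PySem.List.enumerate (lines.drop sN) (sN : Int)).find?
      (fun p => PySem.Str.isIn "{" p.2) with
  | none =>
    exact pvTail_part lines sN
  | some p =>
    have hmem := List.mem_of_find?_eq_some hF
    rw [PySem.List.mem_enumerate_iff] at hmem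
    obtain ⟨k, hk, hp⟩ := hmem
    have h1 : p.1 = ((sN + k : Nat) : Int) := by rw [hp]; push_cast; ring
    simp only [h1]
    exact pvTail_part lines (sN + k)

-- ===== VERDICT (by name: the statement is the Claim_ definition above) =====
theorem extract_method_body_spec : Claim_equal_extract_method_body := by
  intro lines s _ hpre
  unfold Spec_extract_method_body
  obtain ⟨sN, rfl⟩ : ∃ n : Nat, s = (n : Int) :=
    ⟨s.toNat, (Int.toNat_of_nonneg hpre).symm⟩
  exact pvMain_nat lines sN
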